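-- pv_equiv track=rewrite | github.com/LPY22/codeT_pro | src/solutionCov.py | remove_values_from_list
-- ===== SOURCE A (Python) =====
-- def remove_values_from_list(input_list, value, count):
--     # 使用列表推导式和条件语句删除指定数量的值
--     output_list = []
--     value_removed_count = 0
--
--     for item in input_list:
--         if item == value and value_removed_count < count:
--             value_removed_count += 1
--         else:
--             output_list.append(item)
--
--     return output_list
-- ===== SOURCE B (Python) =====
-- def remove_values_from_list(input_list, value, count):
--     out = list(input_list)
--     removed = 0
--     while removed < count:
--         try:
--             out.remove(value)
--         except ValueError:
--             break
--         removed += 1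
--     return out
-- ===== Notes on version B (the rewrite author's own statement) =====
-- stated objective: idiomatic
-- what changed: Replaces A's single filtering pass with an explicit counter by a copy of the list plus repeated list.remove calls (each deleting the first remaining occurrence) until count removals are done or a ValueError signals no occurrence is left.
import Mathlib
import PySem

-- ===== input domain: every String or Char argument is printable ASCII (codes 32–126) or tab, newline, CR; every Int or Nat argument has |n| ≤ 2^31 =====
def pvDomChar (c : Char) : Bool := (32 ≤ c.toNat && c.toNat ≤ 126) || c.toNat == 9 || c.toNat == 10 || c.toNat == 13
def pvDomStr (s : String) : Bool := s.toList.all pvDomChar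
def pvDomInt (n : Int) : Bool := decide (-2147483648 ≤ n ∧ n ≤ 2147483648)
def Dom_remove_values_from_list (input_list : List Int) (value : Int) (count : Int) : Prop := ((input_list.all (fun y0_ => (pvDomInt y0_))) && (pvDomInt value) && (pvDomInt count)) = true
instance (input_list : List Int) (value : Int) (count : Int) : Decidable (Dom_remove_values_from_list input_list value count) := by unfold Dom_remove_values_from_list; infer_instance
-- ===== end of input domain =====

-- B replaces A's single filtering pass (explicit removed-counter) by copying the list and
-- repeatedly deleting the first remaining occurrence via list.remove until count removals
-- or none is left (idiomatic; same return value, no speed claim).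

-- ===== PORT A =====
def remove_values_from_list (input_list : List Int) (value : Int) (count : Int) : List Int :=
  -- for item in input_list: if item == value and removed < count: removed += 1 else append
  (input_list.foldl
    (fun (st : List Int × Int) item =>
      if item = value ∧ st.2 < count then (st.1, st.2 + 1) else (st.1 ++ [item], st.2))
    ([], 0)).1

-- ===== PORT B =====
theorem remove?_of_mem {xs : List Int} {v : Int} (h : v ∈ xs) :
    PySem.List.remove? xs v = some (xs.erase v) := by
  cases hi : List.idxOf? v xs with
  | none => exact absurd h (by simpa [List.idxOf?_eq_none_iff] using hi)
  | some i =>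
    have := List.erase_eq_eraseIdx xs v
    rw [hi] at this
    simp [PySem.List.remove?, hi, this]

theorem remove?_of_not_mem {xs : List Int} {v : Int} (h : v ∉ xs) :
    PySem.List.remove? xs v = none := by
  simp [PySem.List.remove?, List.idxOf?_eq_none_iff, h]

def altLoop (out : List Int) (value : Int) (count removed : Int) : List Int :=
  if removed < count then
    match h : PySem.List.remove? out value with
    | some out' => altLoop out' value count (removed + 1)
    | none => out
  else out
termination_by out.length
decreasing_by
  have hm : value ∈ out := by
    by_contra hv
    simp [remove?_of_not_mem hv] at h
  rw [remove?_of_mem hm] at h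
  cases h
  have h1 := List.length_erase_of_mem hm
  have h2 := List.length_pos_of_mem hm
  omega

-- B: copy the list, then repeatedly remove the first occurrence until count removals
-- or no occurrence is left (the try/except ValueError break).
def remove_values_from_list_alt (input_list : List Int) (value : Int) (count : Int) : List Int :=
  altLoop input_list value count 0

-- ===== PRECONDITION & SPEC =====
def Spec_remove_values_from_list (input_list : List Int) (value : Int) (count : Int) (out : List Int) : Prop := out = remove_values_from_list_alt input_list value count
instance (input_list : List Int) (value : Int) (count : Int) (out : List Int) : Decidable (Spec_remove_values_from_list input_list value count out) := by unfold Spec_remove_values_from_list; infer_instance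

-- ===== CLAIM (what is proved, stated in full; the proofs are below) =====
def Claim_equal_remove_values_from_list : Prop := ∀ (input_list : List Int) (value : Int) (count : Int), Dom_remove_values_from_list input_list value count → Spec_remove_values_from_list input_list value count (remove_values_from_list input_list value count)

-- ===== LEMMAS AND PROOFS =====

-- Reference "skip" function: drop the first (up to) k occurrences of v.
def skip (l : List Int) (v : Int) (k : Int) : List Int :=
  match l with
  | [] => []
  | x :: xs => if x = v ∧ 0 < k then skip xs v (k - 1) else x :: skip xs v k

theorem skip_of_nonpos (l : List Int) (v : Int) (k : Int) (h : k ≤ 0) : skip l v k = l := by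
  induction l with
  | nil => rfl
  | cons x xs ih =>
    have : ¬ (x = v ∧ 0 < k) := fun hc => absurd hc.2 (by omega)
    simp [skip, this, ih]

theorem skip_of_not_mem (l : List Int) (v : Int) (k : Int) (h : v ∉ l) : skip l v k = l := by
  induction l generalizing k with
  | nil => rfl
  | cons x xs ih =>
    have hx : ¬ (x = v ∧ 0 < k) := fun hc => h (hc.1 ▸ List.mem_cons_self)
    simp [skip, hx, ih _ (fun hv => h (List.mem_cons_of_mem _ hv))]

theorem skip_erase (l : List Int) (v : Int) (k : Int) (hm : v ∈ l) (hk : 0 < k) :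
    skip l v k = skip (l.erase v) v (k - 1) := by
  induction l generalizing k with
  | nil => cases hm
  | cons x xs ih =>
    by_cases hx : x = v
    · subst hx; simp [skip, hk, List.erase_cons_head]
    · have hm' : v ∈ xs := by
        cases List.mem_cons.mp hm with
        | inl h => exact absurd h.symm hx
        | inr h => exact h
      rw [List.erase_cons_tail (by simpa using hx)]
      simp [skip, hx, ih _ hm' hk]

theorem altLoop_eq_skip (v c : Int) : ∀ (n : Nat) (l : List Int), l.length ≤ n →
    ∀ r : Int, altLoop l v c r = skip l v (c - r) := by
  intro n
  induction n with
  | zero =>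
    intro l hl r
    have : l = [] := List.eq_nil_of_length_eq_zero (by omega)
    subst this
    rw [altLoop]
    split <;> rfl
  | succ n ih =>
    intro l hl r
    rw [altLoop]
    by_cases hrc : r < c
    · rw [if_pos hrc]
      split
      · rename_i out' h
        by_cases hm : v ∈ l
        · rw [remove?_of_mem hm] at h
          cases h
          have h1 := List.length_erase_of_mem hm
          have h2 := List.length_pos_of_mem hm
          rw [ih _ (by omega), skip_erase l v (c - r) hm (by omega)]
          congr 1
          omega
        · rw [remove?_of_not_mem hm] at h
          cases h
      · rename_i h
        have hm : v ∉ l := by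
          intro hv
          rw [remove?_of_mem hv] at h
          cases h
        rw [skip_of_not_mem l v _ hm]
    · rw [if_neg hrc, skip_of_nonpos l v _ (by omega)]

theorem foldl_eq_skip (v c : Int) (l : List Int) : ∀ (acc : List Int) (r : Int),
    (l.foldl
      (fun (st : List Int × Int) item =>
        if item = v ∧ st.2 < c then (st.1, st.2 + 1) else (st.1 ++ [item], st.2))
      (acc, r)).1 = acc ++ skip l v (c - r) := by
  induction l with
  | nil => intro acc r; simp [skip]
  | cons x xs ih =>
    intro acc r
    by_cases hx : x = v ∧ r < c
    · rw [List.foldl_cons, if_pos hx, ih]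
      have hsk : skip (x :: xs) v (c - r) = skip xs v (c - r - 1) := by
        simp [skip, hx.1]; omega
      rw [hsk]
      congr 2
      omega
    · have hsk : ¬ (x = v ∧ 0 < c - r) := fun hc => hx ⟨hc.1, by omega⟩
      rw [List.foldl_cons, if_neg hx, ih]
      rw [show skip (x :: xs) v (c - r) = x :: skip xs v (c - r) from by simp only [skip]; rw [if_neg hsk]]
      simp

-- ===== VERDICT (by name: the statement is the Claim_ definition above) =====
theorem remove_values_from_list_spec : Claim_equal_remove_values_from_list := by
  intro l v c _
  show remove_values_from_list l v c = remove_values_from_list_alt l v c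
  rw [remove_values_from_list, remove_values_from_list_alt,
    altLoop_eq_skip v c l.length l (le_refl _) 0, foldl_eq_skip]
  simp
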